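-- pv_equiv track=rewrite | github.com/scriptforge-ds/outreach-report-generator | pipeline/extraction/metadata0.py | pick_relevant_window
-- ===== SOURCE A (Python) =====
-- def pick_relevant_window(text: str, window: int = 7000) -> str:
--     """
--     Metadata typically appears early in your narration.
--     We pick a window around the first occurrence of any key phrase.
--     """
--     t = (text or "")
--     tn = t.lower()
--     keys = [
--         "today", "date", "day",
--         "village", "panchayat", "block", "district",
--         "coordinator", "reporting manager", "sarpanch",
--         "phone",
--         "event start", "event end", "meeting location", "event location",
--         "farmers", "male farmers", "female farmers", "total farmers",
--     ]
--     idxs = [tn.find(k) for k in keys if tn.find(k) != -1]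
--     if not idxs:
--         return t[:window]
--     i = max(min(idxs) - window // 2, 0)
--     return t[i:i + window]
-- ===== SOURCE B (Python) =====
-- KEYS_CSV = ("today,date,day,village,panchayat,block,district,"
--             "coordinator,reporting manager,sarpanch,phone,"
--             "event start,event end,meeting location,event location,"
--             "farmers,male farmers,female farmers,total farmers")
--
--
-- def _first_hit(s, keys):
--     """Left-to-right scan: return the first position where any key starts, -1 if none."""
--     j, n = 0, len(s)
--     while j < n:
--         for k in keys:
--             if s.startswith(k, j):
--                 return j
--         j += 1
--     return -1
--
--
-- def pick_relevant_window(text: str, window: int = 7000) -> str: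
--     t = text or ""
--     hit = _first_hit(t.lower(), KEYS_CSV.split(","))
--     if hit < 0:
--         return t[:window]
--     start = max(hit - window // 2, 0)
--     return t[start:start + window]
-- ===== Notes on version B (the rewrite author's own statement) =====
-- stated objective: alternative
-- what changed: Replaces the per-key full-text find() passes plus min() with a _first_hit helper doing one left-to-right while-loop over positions that returns at the first position where any key phrase starts (str.startswith), with the key list built by splitting one CSV constant.
import Mathlib
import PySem

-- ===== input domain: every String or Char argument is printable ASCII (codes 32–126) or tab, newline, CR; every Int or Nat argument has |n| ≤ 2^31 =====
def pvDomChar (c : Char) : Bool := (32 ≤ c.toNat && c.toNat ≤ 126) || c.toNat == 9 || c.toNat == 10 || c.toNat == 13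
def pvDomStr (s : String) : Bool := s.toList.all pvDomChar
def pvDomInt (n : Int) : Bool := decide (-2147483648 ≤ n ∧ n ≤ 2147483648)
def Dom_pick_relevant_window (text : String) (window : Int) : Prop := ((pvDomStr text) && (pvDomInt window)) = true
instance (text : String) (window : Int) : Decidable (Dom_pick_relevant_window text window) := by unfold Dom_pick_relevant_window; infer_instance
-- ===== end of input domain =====

-- B replaces the per-key find() passes + min() with a recursive left-to-right scan helper
-- that returns at the first position where any key starts (alternative decomposition; same worst-case cost).


-- ===== PORT A =====
def pvKeysA : List String :=
  ["today", "date", "day",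
   "village", "panchayat", "block", "district",
   "coordinator", "reporting manager", "sarpanch",
   "phone",
   "event start", "event end", "meeting location", "event location",
   "farmers", "male farmers", "female farmers", "total farmers"]

def pick_relevant_window (text : String) (window : Int) : String :=
  let t := if text = "" then "" else text   -- (text or "")
  let tn := PySem.Str.lower t
  let idxs := pvKeysA.filterMap (fun k =>
    if PySem.Str.find tn k ≠ -1 then some (PySem.Str.find tn k) else none)
  match PySem.List.min? idxs (fun x => x) with  -- 'if not idxs: …' / min(idxs)
  | none => PySem.Str.slice t none (some window)
  | some m =>
      let i := max (m - PySem.Int.floordiv window 2) 0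
      PySem.Str.slice t (some i) (some (i + window))

-- ===== PORT B =====
-- the CSV constant of key phrases (Source B's KEYS_CSV)
def pvKeysCsv : String :=
  "today,date,day,village,panchayat,block,district,coordinator,reporting manager,sarpanch,phone,event start,event end,meeting location,event location,farmers,male farmers,female farmers,total farmers"

-- Source B's _first_hit: while-loop over positions j, returning j as soon as some key starts at j
def pvFirstHit (s : List Char) (keys : List String) (j : Nat) : Int :=
  if j < s.length then
    if keys.any (fun k => PySem.Chars.startswith (s.drop j) k.toList) then (j : Int)
    else pvFirstHit s keys (j + 1)
  else -1
termination_by s.length - j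

def pick_relevant_window_alt (text : String) (window : Int) : String :=
  let t := if text = "" then "" else text   -- (text or "")
  let hit := pvFirstHit (PySem.Str.lower t).toList ((PySem.Str.split? pvKeysCsv ",").getD []) 0
  if hit < 0 then PySem.Str.slice t none (some window)
  else
    let start := max (hit - PySem.Int.floordiv window 2) 0
    PySem.Str.slice t (some start) (some (start + window))

-- ===== PRECONDITION & SPEC =====
def Spec_pick_relevant_window (text : String) (window : Int) (out : String) : Prop := out = pick_relevant_window_alt text window
instance (text : String) (window : Int) (out : String) : Decidable (Spec_pick_relevant_window text window out) := by unfold Spec_pick_relevant_window; infer_instance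

-- ===== CLAIM (what is proved, stated in full; the proofs are below) =====
def Claim_equal_pick_relevant_window : Prop := ∀ (text : String) (window : Int), Dom_pick_relevant_window text window → Spec_pick_relevant_window text window (pick_relevant_window text window)

-- ===== LEMMAS AND PROOFS =====

-- splitting the CSV constant yields exactly A's key list
set_option maxRecDepth 100000 in
lemma pv_keys_split : (PySem.Str.split? pvKeysCsv ",").getD [] = pvKeysA := by decide

-- no key phrase is the empty string
lemma pv_keys_ne_nil : ∀ k ∈ pvKeysA, k.toList ≠ [] := by decide

-- the scan returns -1 when no position at or after j matches
lemma pvFirstHit_none (s : List Char) (keys : List String) (j : Nat)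
    (h : ∀ i, j ≤ i → i < s.length →
      keys.any (fun k => PySem.Chars.startswith (s.drop i) k.toList) = false) :
    pvFirstHit s keys j = -1 := by
  unfold pvFirstHit
  split
  · next hlt =>
    rw [h j (le_refl j) hlt]
    simp only [Bool.false_eq_true, if_false]
    exact pvFirstHit_none s keys (j + 1) (fun i hi hlen => h i (by omega) hlen)
  · rfl
termination_by s.length - j

-- the scan returns the first matching position at or after j
lemma pvFirstHit_some (s : List Char) (keys : List String) (j m : Nat)
    (hjm : j ≤ m) (hm : m < s.length)
    (hp : keys.any (fun k => PySem.Chars.startswith (s.drop m) k.toList) = true)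
    (hmin : ∀ i, j ≤ i → i < m →
      keys.any (fun k => PySem.Chars.startswith (s.drop i) k.toList) = false) :
    pvFirstHit s keys j = (m : Int) := by
  unfold pvFirstHit
  rw [if_pos (by omega : j < s.length)]
  by_cases hj : j = m
  · subst hj; rw [hp]; simp
  · rw [hmin j (le_refl j) (by omega)]
    simp only [Bool.false_eq_true, if_false]
    exact pvFirstHit_some s keys (j + 1) m (by omega) hm hp
      (fun i hi hilt => hmin i (by omega) hilt)
termination_by s.length - j

-- the core correspondence: A's min-of-finds equals B's first-hit scan
lemma pv_main (tn : String) :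
    (match PySem.List.min? (pvKeysA.filterMap (fun k =>
       if PySem.Str.find tn k ≠ -1 then some (PySem.Str.find tn k) else none)) (fun x => x) with
     | none => (-1 : Int)
     | some m => m)
    = pvFirstHit tn.toList pvKeysA 0 := by
  simp only [PySem.Str.find_eq]
  set L := tn.toList with hL
  have hocc : ∀ (k : String) (i : Nat), k.toList <+: L.drop i →
      PySem.Chars.find L k.toList ≠ -1 := by
    intro k i hpre
    rw [PySem.Chars.find_ne_neg_one_iff]
    exact (PySem.Chars.isIn_iff_infix _ _).mp
      ((PySem.Chars.exists_prefix_drop_iff_isIn _ _).mp ⟨i, hpre⟩)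
  cases hfm : PySem.List.min? (pvKeysA.filterMap (fun k =>
      if PySem.Chars.find L k.toList ≠ -1 then some (PySem.Chars.find L k.toList) else none))
      (fun x => x) with
  | none =>
      have hnil := (PySem.List.min?_eq_none_iff _ _).mp hfm
      have hall : ∀ k ∈ pvKeysA, PySem.Chars.find L k.toList = -1 := by
        intro k hk
        have := (List.filterMap_eq_nil_iff).mp hnil k hk
        by_contra hne
        simp [hne] at this
      rw [pvFirstHit_none]
      intro i _ _
      by_contra hcon
      rw [Bool.not_eq_false, List.any_eq_true] at hcon
      obtain ⟨k, hk, hs⟩ := hcon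
      exact hocc k i ((PySem.Chars.startswith_iff _ _).mp hs) (hall k hk)
  | some m =>
      have hmem := PySem.List.min?_mem hfm
      have hmin := PySem.List.min?_isMin hfm
      obtain ⟨k0, hk0, hk0v⟩ := List.mem_filterMap.mp hmem
      have hfind0 : PySem.Chars.find L k0.toList ≠ -1 := by
        by_contra h; simp [h] at hk0v
      have hm : m = PySem.Chars.find L k0.toList := by
        rw [if_pos hfind0] at hk0v
        exact (Option.some_inj.mp hk0v).symm
      have hm0 : 0 ≤ m := by
        rw [hm]
        refine (PySem.Chars.find_nonneg_iff _ _).mpr ?_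
        exact (PySem.Chars.find_ne_neg_one_iff _ _).mp hfind0
      set j0 : Nat := m.toNat with hj0
      have hspec0 := PySem.Chars.find_spec (s := L) (sub := k0.toList) (by omega)
      have hpre0 : k0.toList <+: L.drop j0 := by
        rw [hj0, hm]
        exact hspec0.1
      have hpj0 : (pvKeysA.any (fun k => PySem.Chars.startswith (L.drop j0) k.toList)) = true := by
        simp only [List.any_eq_true]
        exact ⟨k0, hk0, (PySem.Chars.startswith_iff _ _).mpr hpre0⟩
      have hlt : j0 < L.length := by
        by_contra h
        have hd : L.drop j0 = [] := List.drop_eq_nil_of_le (by omega)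
        rw [hd] at hpre0
        exact pv_keys_ne_nil k0 hk0 (List.prefix_nil.mp hpre0)
      have hbelow : ∀ i, 0 ≤ i → i < j0 →
          (pvKeysA.any (fun k => PySem.Chars.startswith (L.drop i) k.toList)) = false := by
        intro i _ hi
        by_contra hcon
        rw [Bool.not_eq_false, List.any_eq_true] at hcon
        obtain ⟨k, hk, hks⟩ := hcon
        have hprei : k.toList <+: L.drop i := (PySem.Chars.startswith_iff _ _).mp hks
        have hfne : PySem.Chars.find L k.toList ≠ -1 := hocc k i hprei
        have hmemk : PySem.Chars.find L k.toList ∈ pvKeysA.filterMap (fun k =>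
            if PySem.Chars.find L k.toList ≠ -1 then some (PySem.Chars.find L k.toList) else none) :=
          List.mem_filterMap.mpr ⟨k, hk, by rw [if_pos hfne]⟩
        have hle : m ≤ PySem.Chars.find L k.toList := hmin _ hmemk
        have hspec := PySem.Chars.find_spec (s := L) (sub := k.toList) (by omega)
        have hnotlt : ¬ i < (PySem.Chars.find L k.toList).toNat :=
          fun hlt' => hspec.2 i hlt' hprei
        omega
      rw [pvFirstHit_some L pvKeysA 0 j0 (Nat.zero_le _) hlt hpj0 hbelow]
      show m = ((j0 : Nat) : Int)
      omega

-- ===== VERDICT (by name: the statement is the Claim_ definition above) =====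
theorem pick_relevant_window_spec : Claim_equal_pick_relevant_window := by
  intro text window _
  unfold Spec_pick_relevant_window pick_relevant_window pick_relevant_window_alt
  simp only [pv_keys_split]
  rw [← pv_main (PySem.Str.lower (if text = "" then "" else text))]
  cases hfm : PySem.List.min? ((pvKeysA.filterMap (fun k =>
      if PySem.Str.find (PySem.Str.lower (if text = "" then "" else text)) k ≠ -1
      then some (PySem.Str.find (PySem.Str.lower (if text = "" then "" else text)) k) else none)))
      (fun x => x) with
  | none => simp
  | some m =>
      have hmem := PySem.List.min?_mem hfm
      obtain ⟨k0, hk0, hk0v⟩ := List.mem_filterMap.mp hmem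
      have hm0 : 0 ≤ m := by
        by_cases hf : PySem.Str.find (PySem.Str.lower (if text = "" then "" else text)) k0 = -1
        · rw [if_neg (not_not_intro hf)] at hk0v
          exact absurd hk0v (by simp)
        · rw [if_pos hf] at hk0v
          rw [← Option.some_inj.mp hk0v, PySem.Str.find_eq]
          refine (PySem.Chars.find_nonneg_iff _ _).mpr ?_
          exact (PySem.Chars.find_ne_neg_one_iff _ _).mp (by simpa [PySem.Str.find_eq] using hf)
      simp only
      rw [if_neg (by omega : ¬ m < 0)]
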